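-- pv_equiv track=rewrite | github.com/DavideOrlandoUni/Gestione-Taxi-Efficient | logica/costruzione_viaggio_da_azioni_sas/costruzione_viaggio.py | estrai_primi_pickup_da_azioni
-- ===== SOURCE A (Python) =====
-- from typing import List, Dict, Tuple, Optional
--
-- def estrai_primi_pickup_da_azioni(azioni: List[str]) -> Dict[str, str]:
--     """Prima associazione passeggero->location (es. 'P1'->'l1')."""
--     mappa_pickup: Dict[str, str] = {}
--     for raw in azioni:
--         tok = raw.strip("()").split()
--         if len(tok) == 4 and tok[0] == "pickup":
--             p = tok[2].upper()
--             l = tok[3].lower()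
--             if p not in mappa_pickup:
--                 mappa_pickup[p] = l
--     return mappa_pickup
-- ===== SOURCE B (Python) =====
-- def estrai_primi_pickup_da_azioni(azioni):
--     """Prima associazione passeggero->location (es. 'P1'->'l1')."""
--     # phase 1: extract every well-formed pickup as a (passenger, location) pair
--     pick = []
--     for raw in azioni:
--         tok = raw.strip("()").split()
--         if len(tok) == 4 and tok[0] == "pickup":
--             pick.append((tok[2].upper(), tok[3].lower()))
--     # phase 2: distinct passengers in order of first pickup
--     ordine = list(dict.fromkeys(p for p, _ in pick))
--     # phase 3: for each passenger, the location of its first pickup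
--     return {p: next(l for q, l in pick if q == p) for p in ordine}
-- ===== Notes on version B (the rewrite author's own statement) =====
-- stated objective: alternative
-- what changed: Replaces A's single pass that maintains a dict with a first-seen membership guard by a three-phase pipeline: extract all pickup pairs, deduplicate the passenger keys keeping first occurrences (dict.fromkeys), then look up each passenger's first location with an inner scan.
import Mathlib
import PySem

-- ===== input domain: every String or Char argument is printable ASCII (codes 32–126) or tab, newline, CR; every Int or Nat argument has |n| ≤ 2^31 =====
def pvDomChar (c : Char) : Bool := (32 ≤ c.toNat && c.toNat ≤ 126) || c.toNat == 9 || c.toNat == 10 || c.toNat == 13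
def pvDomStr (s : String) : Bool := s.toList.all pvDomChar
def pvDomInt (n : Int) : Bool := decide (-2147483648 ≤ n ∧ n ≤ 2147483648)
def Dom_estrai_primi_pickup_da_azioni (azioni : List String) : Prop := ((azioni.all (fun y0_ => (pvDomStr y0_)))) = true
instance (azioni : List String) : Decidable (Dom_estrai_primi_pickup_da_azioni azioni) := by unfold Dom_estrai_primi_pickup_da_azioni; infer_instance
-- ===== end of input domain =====

-- B replaces A's one-pass dict-with-guard by a three-phase pipeline (extract pairs, dedup keys, per-key first-match lookup); alternative decomposition, same results.


-- ===== PORT A =====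
-- literal port: dict with first-wins guard, one pass
def estrai_primi_pickup_da_azioni (azioni : List String) : List (String × String) :=
  (azioni.foldl (fun (d : PySem.Dict String String) raw =>
      let tok := PySem.Str.split₀ (PySem.Str.stripChars raw "()")
      if tok.length = 4 ∧ PySem.List.pyGetD tok 0 "" = "pickup" then
        let p := PySem.Str.upper (PySem.List.pyGetD tok 2 "")
        let l := PySem.Str.lower (PySem.List.pyGetD tok 3 "")
        if d.contains p then d else d.insert p l
      else d)
    PySem.Dict.empty).items

-- ===== PORT B =====
-- phase 1: collect all well-formed pickup pairs; phase 2: dict.fromkeys = PySem.List.dedup;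
-- phase 3: dict comprehension over the (distinct) keys — its items are exactly this map,
-- with next(l for q, l in pick if q == p) ported as List.find?.
def estrai_primi_pickup_da_azioni_alt (azioni : List String) : List (String × String) :=
  let pick := azioni.foldl (fun (acc : List (String × String)) raw =>
      let tok := PySem.Str.split₀ (PySem.Str.stripChars raw "()")
      if tok.length = 4 ∧ PySem.List.pyGetD tok 0 "" = "pickup" then
        acc ++ [(PySem.Str.upper (PySem.List.pyGetD tok 2 ""),
                 PySem.Str.lower (PySem.List.pyGetD tok 3 ""))]
      else acc) []
  let ordine := PySem.List.dedup (pick.map Prod.fst)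
  ordine.map (fun p => (p, ((pick.find? (fun e => e.1 == p)).map Prod.snd).getD ""))

-- ===== PRECONDITION & SPEC =====
def Spec_estrai_primi_pickup_da_azioni (azioni : List String) (out : List (String × String)) : Prop := out = estrai_primi_pickup_da_azioni_alt azioni
instance (azioni : List String) (out : List (String × String)) : Decidable (Spec_estrai_primi_pickup_da_azioni azioni out) := by unfold Spec_estrai_primi_pickup_da_azioni; infer_instance

-- ===== CLAIM (what is proved, stated in full; the proofs are below) =====
def Claim_equal_estrai_primi_pickup_da_azioni : Prop := ∀ (azioni : List String), Dom_estrai_primi_pickup_da_azioni azioni → Spec_estrai_primi_pickup_da_azioni azioni (estrai_primi_pickup_da_azioni azioni)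

-- ===== LEMMAS AND PROOFS =====

/-- The shared parse of one action line. -/
def pvParse? (raw : String) : Option (String × String) :=
  let tok := PySem.Str.split₀ (PySem.Str.stripChars raw "()")
  if tok.length = 4 ∧ PySem.List.pyGetD tok 0 "" = "pickup" then
    some (PySem.Str.upper (PySem.List.pyGetD tok 2 ""),
          PySem.Str.lower (PySem.List.pyGetD tok 3 ""))
  else none

/-- Canonical first-wins extraction with a visited list. -/
def pvGo (seen : List String) : List (String × String) → List (String × String)
  | [] => []
  | (p, l) :: rest =>
      if seen.contains p then pvGo seen rest else (p, l) :: pvGo (p :: seen) rest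

/-- dedup relative to an already-seen list. -/
def pvNew (seen : List String) : List String → List String
  | [] => []
  | x :: xs => if seen.contains x then pvNew seen xs else x :: pvNew (x :: seen) xs

def pvFirst (ps : List (String × String)) (q : String) : String :=
  ((ps.find? (fun e => e.1 == q)).map Prod.snd).getD ""

lemma pvA_eq_foldl_parse (azioni : List String) (d : PySem.Dict String String) :
    azioni.foldl (fun (d : PySem.Dict String String) raw =>
      let tok := PySem.Str.split₀ (PySem.Str.stripChars raw "()")
      if tok.length = 4 ∧ PySem.List.pyGetD tok 0 "" = "pickup" then
        let p := PySem.Str.upper (PySem.List.pyGetD tok 2 "")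
        let l := PySem.Str.lower (PySem.List.pyGetD tok 3 "")
        if d.contains p then d else d.insert p l
      else d) d
    = (azioni.filterMap pvParse?).foldl
        (fun d pl => if d.contains pl.1 then d else d.insert pl.1 pl.2) d := by
  induction azioni generalizing d with
  | nil => rfl
  | cons raw rest ih =>
      simp only [List.foldl_cons, List.filterMap_cons, pvParse?]
      by_cases h : (PySem.Str.split₀ (PySem.Str.stripChars raw "()")).length = 4 ∧
          PySem.List.pyGetD (PySem.Str.split₀ (PySem.Str.stripChars raw "()")) 0 "" = "pickup"
      · rw [if_pos h, if_pos h]; simp only [List.foldl_cons]; exact ih _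
      · rw [if_neg h, if_neg h]; exact ih _

lemma pvB_pick_eq_filterMap (azioni : List String) (acc : List (String × String)) :
    azioni.foldl (fun (acc : List (String × String)) raw =>
      let tok := PySem.Str.split₀ (PySem.Str.stripChars raw "()")
      if tok.length = 4 ∧ PySem.List.pyGetD tok 0 "" = "pickup" then
        acc ++ [(PySem.Str.upper (PySem.List.pyGetD tok 2 ""),
                 PySem.Str.lower (PySem.List.pyGetD tok 3 ""))]
      else acc) acc
    = acc ++ azioni.filterMap pvParse? := by
  induction azioni generalizing acc with
  | nil => simp
  | cons raw rest ih =>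
      simp only [List.foldl_cons, List.filterMap_cons, pvParse?]
      by_cases h : (PySem.Str.split₀ (PySem.Str.stripChars raw "()")).length = 4 ∧
          PySem.List.pyGetD (PySem.Str.split₀ (PySem.Str.stripChars raw "()")) 0 "" = "pickup"
      · rw [if_pos h, if_pos h]; simp [ih, pvParse?]
      · rw [if_neg h, if_neg h]; simp [ih, pvParse?]

lemma pvMem_pvNew {xs : List String} {seen : List String} {q : String}
    (h : q ∈ pvNew seen xs) : seen.contains q = false := by
  induction xs generalizing seen with
  | nil => simp [pvNew] at h
  | cons x xs ih =>
      simp only [pvNew] at h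
      split_ifs at h with hc
      · exact ih h
      · rcases List.mem_cons.mp h with rfl | h
        · simpa using hc
        · have h2 := ih h
          simp only [List.contains_cons, Bool.or_eq_false_iff] at h2
          exact h2.2

lemma pvFoldl_add_eq_append (xs : List String) (s t : List String)
    (hst : ∀ q, t.contains q = PySem.Set.contains s q) :
    xs.foldl PySem.Set.add s = s ++ pvNew t xs := by
  induction xs generalizing s t with
  | nil => simp [pvNew]
  | cons x xs ih =>
      simp only [List.foldl_cons, pvNew]
      have hm : ∀ q, (q ∈ t) ↔ (q ∈ s) := fun q => by simpa using hst q
      by_cases hc : t.contains x = true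
      · have hx : x ∈ s := (hm x).mp (by simpa using hc)
        have hadd : PySem.Set.add s x = s := by simp [PySem.Set.add, hx]
        rw [hc, if_pos rfl, hadd]
        exact ih s t hst
      · have hc' : t.contains x = false := by simpa using hc
        have hx : x ∉ s := fun h => by simp [(hm x).mpr h] at hc'
        have hadd : PySem.Set.add s x = s ++ [x] := by simp [PySem.Set.add, hx]
        rw [hc', if_neg (by simp), hadd]
        rw [ih (s ++ [x]) (x :: t) (fun q => by
          by_cases hqx : q = x <;> simp [hqx, hm q])]
        simp

lemma pvFirst_cons_ne (p l q : String) (rest : List (String × String)) (h : q ≠ p) :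
    pvFirst ((p, l) :: rest) q = pvFirst rest q := by
  have hb : (p == q) = false := by simpa using fun hpq => h hpq.symm
  simp [pvFirst, hb]

lemma pvNew_map_first (ps : List (String × String)) (t : List String) :
    (pvNew t (ps.map Prod.fst)).map (fun q => (q, pvFirst ps q)) = pvGo t ps := by
  induction ps generalizing t with
  | nil => simp [pvNew, pvGo]
  | cons pl rest ih =>
      obtain ⟨p, l⟩ := pl
      simp only [List.map_cons, pvNew, pvGo]
      by_cases hc : t.contains p = true
      · rw [hc, if_pos rfl, if_pos rfl, ← ih t]
        apply List.map_congr_left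
        intro q hq
        have hne : q ≠ p := by
          have h1 := pvMem_pvNew hq
          intro he; rw [he] at h1; rw [h1] at hc; exact Bool.false_ne_true hc
        rw [pvFirst_cons_ne p l q rest hne]
      · have hc' : t.contains p = false := by simpa using hc
        rw [hc', if_neg (by simp), if_neg (by simp)]
        simp only [List.map_cons]
        have hp : pvFirst ((p, l) :: rest) p = l := by
          simp [pvFirst]
        rw [hp, ← ih (p :: t)]
        congr 1
        apply List.map_congr_left
        intro q hq
        have h1 := pvMem_pvNew hq
        have hne : q ≠ p := by
          intro he
          rw [he] at h1
          simp at h1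
        rw [pvFirst_cons_ne p l q rest hne]

lemma pvA_items (ps : List (String × String)) (d : PySem.Dict String String)
    (seen : List String) (hst : ∀ q, seen.contains q = d.contains q) :
    (ps.foldl (fun d pl => if d.contains pl.1 then d else d.insert pl.1 pl.2) d).items
      = d.items ++ pvGo seen ps := by
  induction ps generalizing d seen with
  | nil => simp [pvGo]
  | cons pl rest ih =>
      obtain ⟨p, l⟩ := pl
      simp only [List.foldl_cons, pvGo]
      by_cases hc : d.contains p = true
      · rw [if_pos hc, (hst p).trans hc, if_pos rfl]
        exact ih d seen hst
      · have hc' : d.contains p = false := by simpa using hc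
        rw [if_neg hc, (hst p).trans hc', if_neg (by simp)]
        rw [ih (d.insert p l) (p :: seen) (fun q => by
          rw [PySem.Dict.contains_insert, List.contains_cons, hst q])]
        rw [PySem.Dict.items_insert_of_not_contains d hc' (v := l)]
        simp

-- ===== VERDICT (by name: the statement is the Claim_ definition above) =====
theorem estrai_primi_pickup_da_azioni_spec : Claim_equal_estrai_primi_pickup_da_azioni := by
  intro azioni _
  show _ = _
  unfold estrai_primi_pickup_da_azioni estrai_primi_pickup_da_azioni_alt
  rw [pvA_eq_foldl_parse, pvB_pick_eq_filterMap]
  simp only [List.nil_append]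
  rw [pvA_items (azioni.filterMap pvParse?) PySem.Dict.empty [] (fun q => by
    simp [PySem.Dict.contains_empty])]
  have hded : PySem.List.dedup ((azioni.filterMap pvParse?).map Prod.fst)
      = pvNew [] ((azioni.filterMap pvParse?).map Prod.fst) := by
    rw [PySem.List.dedup_eq_ofList, PySem.Set.ofList_eq_foldl,
      pvFoldl_add_eq_append _ [] [] (fun q => by simp [PySem.Set.contains])]
    simp
  rw [hded]
  have hmap := pvNew_map_first (azioni.filterMap pvParse?) []
  simp only [pvFirst] at hmap
  rw [hmap]
  rfl
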